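-- pv_equiv track=rewrite | github.com/AntiPhoton47/Optical-QMEPS-Explainability | quantum_optical_photonic_meps_animals.py | bosonic_basis
-- ===== SOURCE A (Python) =====
-- from typing import Any, Dict, List, Optional, Sequence, Tuple
--
-- def bosonic_basis(num_modes: int, max_total_excitation: int) -> List[Tuple[int, ...]]:
--     basis: List[Tuple[int, ...]] = []
--
--     def rec(mode: int, remaining: int, prefix: List[int]) -> None:
--         # Recursive composition generation is much cheaper than naively looping
--         # over every occupancy tuple in (cutoff + 1) ** num_modes.
--         if mode == num_modes:
--             basis.append(tuple(prefix))
--             return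
--         for n in range(remaining + 1):
--             prefix.append(n)
--             rec(mode + 1, remaining - n, prefix)
--             prefix.pop()
--
--     rec(0, max_total_excitation, [])
--     return basis
-- ===== SOURCE B (Python) =====
-- def bosonic_basis(num_modes, max_total_excitation):
--     # Breadth-first, level-per-mode expansion instead of depth-first recursion:
--     # carry (prefix, remaining) pairs and extend every prefix by one mode at a time.
--     states = [((), max_total_excitation)]
--     for _ in range(num_modes):
--         if not states:
--             break
--         states = [(p + (n,), r - n) for (p, r) in states for n in range(r + 1)]
--     return [p for (p, _) in states]
-- ===== Notes on version B (the rewrite author's own statement) =====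
-- stated objective: alternative
-- what changed: Replaces the depth-first recursion with nested-loop backtracking by a breadth-first level-per-mode expansion: a list of (prefix, remaining) states is rebuilt once per mode with a comprehension, which preserves the lexicographic output order.
-- outside the precondition, e.g. on bosonic_basis(-1, -1): A returns [], B returns [()]
import Mathlib
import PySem

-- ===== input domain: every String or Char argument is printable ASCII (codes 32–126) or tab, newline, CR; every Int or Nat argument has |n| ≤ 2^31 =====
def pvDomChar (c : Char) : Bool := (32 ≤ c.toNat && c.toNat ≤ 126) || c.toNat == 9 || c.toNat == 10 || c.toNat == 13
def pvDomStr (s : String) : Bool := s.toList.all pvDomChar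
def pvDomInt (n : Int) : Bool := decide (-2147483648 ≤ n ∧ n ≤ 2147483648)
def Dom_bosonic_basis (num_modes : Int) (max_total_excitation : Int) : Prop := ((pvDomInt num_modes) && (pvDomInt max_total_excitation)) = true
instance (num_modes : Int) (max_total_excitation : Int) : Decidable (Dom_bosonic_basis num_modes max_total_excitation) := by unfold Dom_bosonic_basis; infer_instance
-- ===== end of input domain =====

-- B replaces A's depth-first recursion by a breadth-first level-per-mode expansion of
-- (pref, remaining) states (objective: alternative decomposition, same output order).

-- ===== PORT A =====
-- rec(mode, remaining, pref): appends completed tuples onto the accumulator.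
-- 'fuel' only makes the recursion total in Lean; inside Pre_ (0 ≤ num_modes) the
-- starting fuel num_modes.toNat + 1 is never exhausted.
def bosonicRecA (num_modes : Int) : Nat → Int → Int → List Int → List (List Int) → List (List Int)
  | 0, _, _, _, acc => acc
  | fuel + 1, mode, remaining, pref, acc =>
    if mode = num_modes then acc ++ [pref]
    else
      (PySem.List.pyRange 0 (remaining + 1) 1).foldl
        (fun acc n => bosonicRecA num_modes fuel (mode + 1) (remaining - n) (pref ++ [n]) acc) acc

def bosonic_basis (num_modes : Int) (max_total_excitation : Int) : List (List Int) :=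
  bosonicRecA num_modes (num_modes.toNat + 1) 0 max_total_excitation [] []

-- ===== PORT B =====
-- one level of expansion: every (pref, remaining) state grows by one mode
def bosonicStep (states : List (List Int × Int)) : List (List Int × Int) :=
  states.flatMap (fun pr =>
    (PySem.List.pyRange 0 (pr.2 + 1) 1).map (fun n => (pr.1 ++ [n], pr.2 - n)))

-- 'for _ in range(num_modes): if not states: break; states = …' — a counted loop
-- with an early exit once no state is left, recursed on the remaining iteration count
def bosonicLevels : Nat → List (List Int × Int) → List (List Int × Int)
  | 0, states => states
  | k + 1, states => if states = [] then states else bosonicLevels k (bosonicStep states)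

def bosonic_basis_alt (num_modes : Int) (max_total_excitation : Int) : List (List Int) :=
  (bosonicLevels num_modes.toNat [([], max_total_excitation)]).map Prod.fst

-- ===== PRECONDITION & SPEC =====
-- Pre_ restricts to the natural domain of a mode count: for num_modes < 0 A either
-- recurses forever and raises RecursionError (max_total_excitation ≥ 0) or returns []
-- by accident of its mode == num_modes guard (max_total_excitation < 0), while B
-- naturally returns [()] there; negative mode counts are outside the function's purpose.
def Pre_bosonic_basis (num_modes : Int) (max_total_excitation : Int) : Prop :=
  0 ≤ num_modes
instance (num_modes : Int) (max_total_excitation : Int) : Decidable (Pre_bosonic_basis num_modes max_total_excitation) := by unfold Pre_bosonic_basis; infer_instance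

def pvWitness_bosonic_basis : Int × Int := (2, 2)

def Spec_bosonic_basis (num_modes : Int) (max_total_excitation : Int) (out : List (List Int)) : Prop := out = bosonic_basis_alt num_modes max_total_excitation
instance (num_modes : Int) (max_total_excitation : Int) (out : List (List Int)) : Decidable (Spec_bosonic_basis num_modes max_total_excitation out) := by unfold Spec_bosonic_basis; infer_instance

-- ===== CLAIM (what is proved, stated in full; the proofs are below) =====
def Claim_equal_bosonic_basis : Prop := ∀ (num_modes : Int) (max_total_excitation : Int), Dom_bosonic_basis num_modes max_total_excitation → Pre_bosonic_basis num_modes max_total_excitation → Spec_bosonic_basis num_modes max_total_excitation (bosonic_basis num_modes max_total_excitation)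

-- ===== LEMMAS AND PROOFS =====

theorem foldl_congr_of_mem {α β : Type} {l : List β} {f g : α → β → α}
    (h : ∀ (acc : α) (x : β), x ∈ l → f acc x = g acc x) (init : α) :
    l.foldl f init = l.foldl g init := by
  induction l generalizing init with
  | nil => rfl
  | cons x l ih =>
    simp only [List.foldl_cons, h init x (List.mem_cons_self ..)]
    exact ih (fun acc y hy => h acc y (List.mem_cons_of_mem _ hy)) _

theorem bosonicStep_nil : bosonicStep [] = [] := by
  simp [bosonicStep]

theorem bosonicStep_append (xs ys : List (List Int × Int)) :
    bosonicStep (xs ++ ys) = bosonicStep xs ++ bosonicStep ys := by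
  simp [bosonicStep]

theorem bosonicStep_iterate_append (k : Nat) (xs ys : List (List Int × Int)) :
    bosonicStep^[k] (xs ++ ys) = bosonicStep^[k] xs ++ bosonicStep^[k] ys := by
  induction k generalizing xs ys with
  | zero => simp
  | succ k ih => simp [Function.iterate_succ_apply, bosonicStep_append, ih]

theorem bosonicStep_iterate_flatMap (k : Nat) (l : List Int)
    (f : Int → List (List Int × Int)) :
    bosonicStep^[k] (l.flatMap f) = l.flatMap (fun n => bosonicStep^[k] (f n)) := by
  induction l with
  | nil => simp [Function.iterate_fixed bosonicStep_nil]
  | cons x l ih => simp [List.flatMap_cons, bosonicStep_iterate_append, ih]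

-- main invariant: the recursive A-side generator equals the k-fold level expansion
theorem bosonicRecA_eq (num_modes : Int) (k fuel : Nat) (hfuel : k < fuel)
    (mode remaining : Int) (hmode : mode + k = num_modes)
    (pref : List Int) (acc : List (List Int)) :
    bosonicRecA num_modes fuel mode remaining pref acc
      = acc ++ (bosonicStep^[k] [(pref, remaining)]).map Prod.fst := by
  induction k generalizing fuel mode remaining pref acc with
  | zero =>
    obtain ⟨fuel, rfl⟩ := Nat.exists_eq_succ_of_ne_zero (Nat.pos_iff_ne_zero.mp hfuel)
    simp [bosonicRecA, show mode = num_modes by omega]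
  | succ k ih =>
    obtain ⟨fuel, rfl⟩ := Nat.exists_eq_succ_of_ne_zero (Nat.pos_iff_ne_zero.mp (Nat.lt_of_le_of_lt (Nat.zero_le _) hfuel))
    have hne : ¬ mode = num_modes := by omega
    rw [bosonicRecA, if_neg hne]
    have hcong : ∀ (acc' : List (List Int)) (n : Int),
        n ∈ PySem.List.pyRange 0 (remaining + 1) 1 →
        bosonicRecA num_modes fuel (mode + 1) (remaining - n) (pref ++ [n]) acc'
          = acc' ++ (bosonicStep^[k] [(pref ++ [n], remaining - n)]).map Prod.fst := by
      intro acc' n _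
      exact ih fuel (by omega) (mode + 1) (remaining - n) (by omega) (pref ++ [n]) acc'
    rw [foldl_congr_of_mem hcong]
    rw [PySem.List.foldl_append_eq_flatMap]
    congr 1
    rw [Function.iterate_succ_apply]
    have hstep : bosonicStep [(pref, remaining)]
        = (PySem.List.pyRange 0 (remaining + 1) 1).flatMap
            (fun n => [(pref ++ [n], remaining - n)]) := by
      simp [bosonicStep, List.flatMap_cons, List.map_eq_flatMap]
    rw [hstep, bosonicStep_iterate_flatMap, List.map_flatMap]

theorem bosonicLevels_eq_iterate (k : Nat) (states : List (List Int × Int)) :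
    bosonicLevels k states = bosonicStep^[k] states := by
  induction k generalizing states with
  | zero => rfl
  | succ k ih =>
    rw [bosonicLevels, Function.iterate_succ_apply]
    split_ifs with h
    · subst h; rw [bosonicStep_nil, Function.iterate_fixed bosonicStep_nil]
    · exact ih _

-- ===== VERDICT (by name: the statement is the Claim_ definition above) =====
theorem bosonic_basis_spec : Claim_equal_bosonic_basis := by
  intro num_modes max_total_excitation _ hpre
  unfold Pre_bosonic_basis at hpre
  unfold Spec_bosonic_basis bosonic_basis bosonic_basis_alt
  rw [bosonicRecA_eq num_modes num_modes.toNat (num_modes.toNat + 1) (by omega) 0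
    max_total_excitation (by omega) [] []]
  rw [bosonicLevels_eq_iterate]
  simp
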